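-- pv_equiv track=rewrite | github.com/miliar/Code_Jam_Webscraper | solutions_python/Problem_185/465.py | min_x
-- ===== SOURCE A (Python) =====
-- def min_x(l):
--   minx = float('inf')
--   results = []
--   for x,y in l:
--     if x < minx:
--       results = []
--       minx = x
--     if x == minx:
--       results.append((x,y))
--   return results
-- ===== SOURCE B (Python) =====
-- def min_x(l):
--   if not l:
--     return []
--   minx = min(x for x, y in l)
--   return [(x, y) for x, y in l if x == minx]
-- ===== Notes on version B (the rewrite author's own statement) =====
-- stated objective: simpler
-- what changed: Replaced the single fused scan that resets/extends an accumulator whenever a new minimum appears by two plain passes: compute the minimum x first, then filter the pairs equal to it (empty list handled up front).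
import Mathlib
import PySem

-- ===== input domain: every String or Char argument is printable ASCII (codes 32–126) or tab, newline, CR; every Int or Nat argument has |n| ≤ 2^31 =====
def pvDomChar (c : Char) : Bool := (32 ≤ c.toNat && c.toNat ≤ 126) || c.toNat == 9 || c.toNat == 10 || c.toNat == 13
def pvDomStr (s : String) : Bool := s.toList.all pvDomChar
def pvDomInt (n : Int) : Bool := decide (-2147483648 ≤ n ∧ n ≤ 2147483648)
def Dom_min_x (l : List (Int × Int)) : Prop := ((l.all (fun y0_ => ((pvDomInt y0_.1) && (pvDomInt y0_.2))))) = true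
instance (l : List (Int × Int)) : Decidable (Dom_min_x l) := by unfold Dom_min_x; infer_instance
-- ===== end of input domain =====

-- B is the same result by two separate scans (min, then filter) instead of A's fused reset-accumulator loop; objective: simpler.

-- ===== PORT A =====
-- A's loop state: minx (none = float('inf')) and the accumulated results.
def minxLoopA : List (Int × Int) → Option Int → List (Int × Int) → List (Int × Int)
  | [], _, res => res
  | (x, y) :: rest, minx, res =>
    let lt : Bool := match minx with | none => true | some m => decide (x < m)
    let minx' : Option Int := if lt then some x else minx
    let res' : List (Int × Int) := if lt then [] else res
    let eq : Bool := match minx' with | none => false | some m => decide (x = m)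
    let res'' : List (Int × Int) := if eq then res' ++ [(x, y)] else res'
    minxLoopA rest minx' res''

def min_x (l : List (Int × Int)) : List (Int × Int) := minxLoopA l none []

-- ===== PORT B =====
def min_x_alt (l : List (Int × Int)) : List (Int × Int) :=
  match l with
  | [] => []
  | _ :: _ =>
    match PySem.List.min? (l.map Prod.fst) (fun x => x) with
    | none => []
    | some m => l.filter (fun p => decide (p.1 = m))

-- ===== PRECONDITION & SPEC =====
def Spec_min_x (l : List (Int × Int)) (out : List (Int × Int)) : Prop := out = min_x_alt l
instance (l : List (Int × Int)) (out : List (Int × Int)) : Decidable (Spec_min_x l out) := by unfold Spec_min_x; infer_instance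

-- ===== CLAIM (what is proved, stated in full; the proofs are below) =====
def Claim_equal_min_x : Prop := ∀ (l : List (Int × Int)), Dom_min_x l → Spec_min_x l (min_x l)

-- ===== LEMMAS AND PROOFS =====
theorem foldl_min_le (fs : List Int) (b : Int) : fs.foldl min b ≤ b := by
  induction fs generalizing b with
  | nil => simp
  | cons a t ih =>
    simp only [List.foldl_cons]
    exact le_trans (ih (min b a)) (min_le_left _ _)

theorem loop_spec (l : List (Int × Int)) : ∀ (m : Int) (res : List (Int × Int)),
    minxLoopA l (some m) res =
      (if m = (l.map Prod.fst).foldl min m then res else []) ++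
        l.filter (fun p => decide (p.1 = (l.map Prod.fst).foldl min m)) := by
  induction l with
  | nil => intro m res; simp [minxLoopA]
  | cons p rest ih =>
    intro m res
    obtain ⟨x, y⟩ := p
    by_cases hlt : x < m
    · have hK : (((x, y) :: rest).map Prod.fst).foldl min m = (rest.map Prod.fst).foldl min x := by
        simp [min_eq_right (le_of_lt hlt)]
      have hKx : (rest.map Prod.fst).foldl min x ≤ x := foldl_min_le _ _
      have hmK : ¬ m = (rest.map Prod.fst).foldl min x := by omega
      simp only [minxLoopA, hlt, decide_true, if_true, List.nil_append]
      rw [ih x [(x, y)], hK]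
      rw [if_neg hmK, List.nil_append, List.filter_cons]
      by_cases hx : x = (rest.map Prod.fst).foldl min x
      · rw [if_pos hx, if_pos (by simpa using hx), List.singleton_append]
      · rw [if_neg hx, if_neg (by simpa using hx), List.nil_append]
    · have hK : (((x, y) :: rest).map Prod.fst).foldl min m = (rest.map Prod.fst).foldl min m := by
        simp [min_eq_left (by omega : m ≤ x)]
      have hKm : (rest.map Prod.fst).foldl min m ≤ m := foldl_min_le _ _
      simp only [minxLoopA, hlt, decide_false, Bool.false_eq_true, if_false]
      rw [hK, List.filter_cons]
      by_cases hxm : x = m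
      · subst hxm
        simp only [decide_true, if_true]
        rw [ih x (res ++ [(x, y)])]
        by_cases hK' : x = (rest.map Prod.fst).foldl min x
        · rw [if_pos hK', if_pos hK', if_pos (by simpa using hK'), List.append_assoc,
            List.singleton_append]
        · rw [if_neg hK', if_neg hK', if_neg (by simpa using hK'), List.nil_append]
      · have hxm' : ¬ x = (rest.map Prod.fst).foldl min m := by omega
        simp only [hxm, decide_false, Bool.false_eq_true, if_false]
        have hd : ¬ (decide (x = (rest.map Prod.fst).foldl min m) = true) := by
          simpa using hxm'
        rw [ih m res, if_neg hd]

-- ===== VERDICT (by name: the statement is the Claim_ definition above) =====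
theorem min_x_spec : Claim_equal_min_x := by
  intro l _
  unfold Spec_min_x min_x min_x_alt
  match l with
  | [] => simp [minxLoopA]
  | (x, y) :: rest =>
    simp only [minxLoopA, decide_true, if_true, List.nil_append, List.map_cons,
      PySem.List.min?_id_cons]
    rw [loop_spec rest x [(x, y)], List.filter_cons]
    by_cases hx : x = (rest.map Prod.fst).foldl min x
    · rw [if_pos hx, if_pos (by simpa using hx), List.singleton_append]
    · rw [if_neg hx, if_neg (by simpa using hx), List.nil_append]
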